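-- pv_equiv track=rewrite | github.com/FlyHorse24/InternEvo | test_corner_case.py | add_new_attribute_NeedRecvForwardStart
-- ===== SOURCE A (Python) =====
-- def add_new_attribute_NeedRecvForwardStart(device_steps):
--     result = []
--
--     for stage_idx, stage_list in enumerate(device_steps):
--         new_stage_list = []
--         for current_tuple in stage_list:
--             op, mb_id, stage_id, time, NeedRecvBackStart = current_tuple
--             new_attr = False
--
--             # 只检查b操作，且不是第一行
--             if op == 'b' and stage_idx > 0:
--                 # 获取上一行(stage)的操作列表
--                 prev_stage = device_steps[stage_idx - 1]
--
--                 # 寻找上一行中相同micro_batch_id的操作位置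
--                 for i, prev_op in enumerate(prev_stage):
--                     if prev_op[1] == mb_id and prev_op[0] == 'b' :  # 找到相同micro_batch_id的操作
--                         #查看是否为f、b组合
--                         #查看前一个操作是否为f，若为w则继续查看前一个，直到遇到b或f为止
--                         s = 1
--                         while (i-s)>0 :
--                             judgestep = prev_stage[i - s]
--                             if judgestep[0] == 'f':
--                                 new_attr = True
--                                 break
--                             elif judgestep[0] == 'b':
--                                 break
--                             elif judgestep[0] == 'w':
--                                 s+=1
--
--             new_stage_list.append((op, mb_id, stage_id, time, NeedRecvBackStart, new_attr))
--         result.append(new_stage_list)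
--
--     return result
-- ===== SOURCE B (Python) =====
-- def add_new_attribute_NeedRecvForwardStart(device_steps):
--     # One linear pass per stage builds a table: mb_id -> True iff some 'b' op for
--     # that mb_id is directly preceded (skipping 'w's) by an 'f' at index > 0.
--     def build_table(stage):
--         table = {}
--         last_op, last_idx = None, -1
--         for idx, entry in enumerate(stage):
--             op = entry[0]
--             if op == 'b' and last_op == 'f' and last_idx > 0:
--                 table[entry[1]] = True
--             if op != 'w':
--                 last_op, last_idx = op, idx
--         return table
--
--     tables = [build_table(stage) for stage in device_steps]
--
--     result = []
--     for stage_idx, stage_list in enumerate(device_steps):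
--         new_stage_list = []
--         for op, mb_id, stage_id, time, NeedRecvBackStart in stage_list:
--             new_attr = stage_idx > 0 and op == 'b' and tables[stage_idx - 1].get(mb_id, False)
--             new_stage_list.append((op, mb_id, stage_id, time, NeedRecvBackStart, new_attr))
--         result.append(new_stage_list)
--     return result
-- ===== Notes on version B (the rewrite author's own statement) =====
-- stated objective: alternative
-- what changed: Replaces A's per-'b'-tuple rescan of the previous stage (with a backward while-walk per matching 'b') by one linear pass per stage that tracks the last non-'w' op and builds an mb_id->bool table once, then a second pass that only looks the flag up.
import Mathlib
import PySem

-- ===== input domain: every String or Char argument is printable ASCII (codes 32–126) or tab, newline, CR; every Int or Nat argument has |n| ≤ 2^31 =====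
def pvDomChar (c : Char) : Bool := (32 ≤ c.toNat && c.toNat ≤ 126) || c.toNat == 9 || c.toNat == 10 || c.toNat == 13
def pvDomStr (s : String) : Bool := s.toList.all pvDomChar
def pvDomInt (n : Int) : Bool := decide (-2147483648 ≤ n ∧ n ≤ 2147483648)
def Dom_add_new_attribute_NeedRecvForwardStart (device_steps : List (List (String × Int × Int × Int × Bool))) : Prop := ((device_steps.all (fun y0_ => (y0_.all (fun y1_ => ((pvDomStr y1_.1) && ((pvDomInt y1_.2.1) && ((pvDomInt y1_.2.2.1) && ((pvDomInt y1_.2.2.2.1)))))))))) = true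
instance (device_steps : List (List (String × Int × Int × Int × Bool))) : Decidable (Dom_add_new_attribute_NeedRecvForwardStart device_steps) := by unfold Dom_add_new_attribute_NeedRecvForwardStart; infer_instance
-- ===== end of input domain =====

-- B replaces A's per-'b'-tuple rescan of the previous stage (a backward while-walk per match) by one
-- linear pass per stage that builds an mb_id → Bool table once, plus a lookup pass (objective: alternative).

-- ===== PORT A =====
-- A's inner `while` walk: s starts at 1; inspects prev[i-s] while i-s>0, skipping 'w' ops.
-- On an op other than 'f'/'b'/'w' the Python while-loop never terminates; this port returns
-- false there (exactly those inputs are excluded by Pre_).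
def pvWhileJudge (prev : List (String × Int × Int × Int × Bool)) (i s : Int) : Bool :=
  if i - s > 0 then
    if (PySem.List.pyGetD prev (i - s) ("", 0, 0, 0, false)).1 = "f" then true
    else if (PySem.List.pyGetD prev (i - s) ("", 0, 0, 0, false)).1 = "b" then false
    else if (PySem.List.pyGetD prev (i - s) ("", 0, 0, 0, false)).1 = "w" then pvWhileJudge prev i (s + 1)
    else false
  else false
termination_by (i - s).toNat
decreasing_by omega

def add_new_attribute_NeedRecvForwardStart (device_steps : List (List (String × Int × Int × Int × Bool))) : List (List (String × Int × Int × Int × Bool × Bool)) :=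
  (PySem.List.enumerate device_steps 0).foldl (fun result p =>
    let stage_idx := p.1
    let new_stage_list := p.2.foldl (fun nsl ct =>
      let op := ct.1
      let mb_id := ct.2.1
      let new_attr :=
        if op = "b" ∧ stage_idx > 0 then
          let prev_stage := PySem.List.pyGetD device_steps (stage_idx - 1) []
          (PySem.List.enumerate prev_stage 0).foldl (fun na q =>
            if q.2.2.1 = mb_id ∧ q.2.1 = "b" then na || pvWhileJudge prev_stage q.1 1 else na) false
        else false
      nsl ++ [(op, mb_id, ct.2.2.1, ct.2.2.2.1, ct.2.2.2.2, new_attr)]) []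
    result ++ [new_stage_list]) []

-- ===== PORT B =====
-- one pass per stage; state = (table, last non-'w' op, its index)
def pvBuildStep (st : PySem.Dict Int Bool × Option String × Int) (q : Int × (String × Int × Int × Int × Bool)) : PySem.Dict Int Bool × Option String × Int :=
  let table := if q.2.1 = "b" ∧ st.2.1 = some "f" ∧ st.2.2 > 0 then st.1.insert q.2.2.1 true else st.1
  if q.2.1 ≠ "w" then (table, some q.2.1, q.1) else (table, st.2.1, st.2.2)

def pvBuildTable (stage : List (String × Int × Int × Int × Bool)) : PySem.Dict Int Bool :=
  ((PySem.List.enumerate stage 0).foldl pvBuildStep (PySem.Dict.empty, none, -1)).1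

def add_new_attribute_NeedRecvForwardStart_alt (device_steps : List (List (String × Int × Int × Int × Bool))) : List (List (String × Int × Int × Int × Bool × Bool)) :=
  let tables := device_steps.map pvBuildTable
  (PySem.List.enumerate device_steps 0).foldl (fun result p =>
    result ++ [p.2.foldl (fun nsl ct =>
      let new_attr := decide (p.1 > 0) && decide (ct.1 = "b") &&
        (PySem.List.pyGetD tables (p.1 - 1) PySem.Dict.empty).getD ct.2.1 false
      nsl ++ [(ct.1, ct.2.1, ct.2.2.1, ct.2.2.2.1, ct.2.2.2.2, new_attr)]) []]) []

-- ===== PRECONDITION & SPEC =====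
-- pvPreStage cur prev = false iff some 'b' op of the stage `cur` matches a 'b' at index i of the
-- previous stage `prev` such that the backward walk from i-1 (skipping 'w's, stopping above index 0)
-- meets an op that is none of 'f'/'b'/'w'.
def pvPreStage (cur prev : List (String × Int × Int × Int × Bool)) : Bool :=
  cur.all (fun t => t.1 != "b" ||
    (List.range prev.length).all (fun i =>
      (prev.getD i ("",0,0,0,false)).1 != "b" || (prev.getD i ("",0,0,0,false)).2.1 != t.2.1 ||
      (List.range i).all (fun j =>
        decide (j = 0) ||
        !((List.range i).all (fun l => decide (l ≤ j) || (prev.getD l ("",0,0,0,false)).1 == "w")) ||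
        ((prev.getD j ("",0,0,0,false)).1 == "f" || (prev.getD j ("",0,0,0,false)).1 == "b" ||
         (prev.getD j ("",0,0,0,false)).1 == "w"))))

-- Pre_ excludes exactly the inputs on which Python A never returns (its while-loop spins forever on
-- an op outside {'f','b','w'} met by the backward walk); on every input it admits A returns normally.
def Pre_add_new_attribute_NeedRecvForwardStart (device_steps : List (List (String × Int × Int × Int × Bool))) : Prop :=
  (List.range device_steps.length).all (fun k =>
    decide (k = 0) || pvPreStage (device_steps.getD k []) (device_steps.getD (k-1) [])) = true
instance (device_steps : List (List (String × Int × Int × Int × Bool))) : Decidable (Pre_add_new_attribute_NeedRecvForwardStart device_steps) := by unfold Pre_add_new_attribute_NeedRecvForwardStart; infer_instance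

def pvWitness_add_new_attribute_NeedRecvForwardStart : (List (List (String × Int × Int × Int × Bool))) :=
  [[("f", 0, 0, 0, false), ("f", 1, 0, 1, false), ("b", 1, 0, 2, false)],
   [("f", 1, 1, 1, false), ("b", 1, 1, 3, true)]]

def Spec_add_new_attribute_NeedRecvForwardStart (device_steps : List (List (String × Int × Int × Int × Bool))) (out : List (List (String × Int × Int × Int × Bool × Bool))) : Prop := out = add_new_attribute_NeedRecvForwardStart_alt device_steps
instance (device_steps : List (List (String × Int × Int × Int × Bool))) (out : List (List (String × Int × Int × Int × Bool × Bool))) : Decidable (Spec_add_new_attribute_NeedRecvForwardStart device_steps out) := by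
  unfold Spec_add_new_attribute_NeedRecvForwardStart
  exact @instDecidableEqList _ (@instDecidableEqList _ (fun a b => by infer_instance)) out _

-- ===== CLAIM (what is proved, stated in full; the proofs are below) =====
def Claim_equal_add_new_attribute_NeedRecvForwardStart : Prop := ∀ (device_steps : List (List (String × Int × Int × Int × Bool))), Dom_add_new_attribute_NeedRecvForwardStart device_steps → Pre_add_new_attribute_NeedRecvForwardStart device_steps → Spec_add_new_attribute_NeedRecvForwardStart device_steps (add_new_attribute_NeedRecvForwardStart device_steps)

-- ===== LEMMAS AND PROOFS =====

-- the while-walk depends only on the position k = i - s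
def pvG (prev : List (String × Int × Int × Int × Bool)) (k : Int) : Bool :=
  if k > 0 then
    if (PySem.List.pyGetD prev k ("", 0, 0, 0, false)).1 = "f" then true
    else if (PySem.List.pyGetD prev k ("", 0, 0, 0, false)).1 = "b" then false
    else if (PySem.List.pyGetD prev k ("", 0, 0, 0, false)).1 = "w" then pvG prev (k - 1)
    else false
  else false
termination_by k.toNat
decreasing_by omega

theorem pvWhileJudge_eq_g (prev : List (String × Int × Int × Int × Bool)) (i s : Int) :
    pvWhileJudge prev i s = pvG prev (i - s) := by
  fun_induction pvWhileJudge with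
  | _ => rw [pvG]; simp_all [sub_add_eq_sub_sub]

theorem pvG_append (prev : List (String × Int × Int × Int × Bool)) (t : String × Int × Int × Int × Bool)
    (k : Int) (hk : k < (prev.length : Int)) :
    pvG (prev ++ [t]) k = pvG prev k := by
  by_cases h : k > 0
  · have hg : PySem.List.pyGetD (prev ++ [t]) k ("", 0, 0, 0, false) = PySem.List.pyGetD prev k ("", 0, 0, 0, false) := by
      rw [PySem.List.pyGetD_eq_getElem _ _ (by omega) (by simp; omega),
          PySem.List.pyGetD_eq_getElem _ _ (by omega) (by omega)]
      exact List.getElem_append_left _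
    conv_lhs => rw [pvG]
    conv_rhs => rw [pvG]
    rw [hg]
    have ih := pvG_append prev t (k-1) (by omega)
    rw [ih]
  · conv_lhs => rw [pvG]
    conv_rhs => rw [pvG]
    simp [h]
termination_by k.toNat
decreasing_by omega

-- the track part of B's fold state, on its own
def pvTrackStep (st : Option String × Int) (q : Int × (String × Int × Int × Int × Bool)) : Option String × Int :=
  if q.2.1 ≠ "w" then (some q.2.1, q.1) else st

def pvTrack (stage : List (String × Int × Int × Int × Bool)) : Option String × Int :=
  (PySem.List.enumerate stage 0).foldl pvTrackStep (none, -1)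

theorem pvTrack_append (prev : List (String × Int × Int × Int × Bool)) (t : String × Int × Int × Int × Bool) :
    pvTrack (prev ++ [t]) = pvTrackStep (pvTrack prev) ((prev.length : Int), t) := by
  unfold pvTrack
  rw [PySem.List.enumerate_append]
  simp [PySem.List.enumerate]

theorem pvG_track (prev : List (String × Int × Int × Int × Bool)) :
    pvG prev ((prev.length : Int) - 1) = decide ((pvTrack prev).1 = some "f" ∧ (pvTrack prev).2 > 0) := by
  induction prev using List.reverseRecOn with
  | nil => rw [pvG]; simp [pvTrack, PySem.List.enumerate]
  | append_singleton prev t ih =>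
    rw [pvTrack_append]
    by_cases hn : prev.length = 0
    · match prev, hn with
      | [], _ =>
        rw [pvG]
        simp [pvTrack, pvTrackStep, PySem.List.enumerate]
        by_cases hw : t.1 = "w" <;> simp [hw]
    · have hl : ((prev ++ [t]).length : Int) - 1 = (prev.length : Int) := by simp
      rw [hl, pvG]
      have hget : PySem.List.pyGetD (prev ++ [t]) (prev.length : Int) ("",0,0,0,false) = t := by
        rw [PySem.List.pyGetD_eq_getElem _ _ (by omega) (by simp)]
        simp
      rw [hget]
      have hpos : ((prev.length : Int) > 0) := by omega
      by_cases hf : t.1 = "f"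
      · simp [hf, pvTrackStep]
      · by_cases hb : t.1 = "b"
        · simp [hb, pvTrackStep]
        · by_cases hw : t.1 = "w"
          · simp only [hpos, if_pos, hw]
            rw [pvG_append _ _ _ (by omega), ih]
            simp [pvTrackStep, hw]
          · simp [hf, hb, hw, pvTrackStep]

theorem pvBuild_snd (l : List (Int × (String × Int × Int × Int × Bool)))
    (init : PySem.Dict Int Bool × Option String × Int) :
    (l.foldl pvBuildStep init).2 = l.foldl pvTrackStep init.2 := by
  induction l generalizing init with
  | nil => rfl
  | cons q l ih =>
    simp only [List.foldl_cons, ih]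
    congr 1
    simp [pvBuildStep, pvTrackStep]
    split_ifs <;> rfl

-- A's per-mb_id value over a previous stage (A's inner for-loop, named)
def pvAval (prev : List (String × Int × Int × Int × Bool)) (m : Int) : Bool :=
  (PySem.List.enumerate prev 0).foldl (fun na q =>
    if q.2.2.1 = m ∧ q.2.1 = "b" then na || pvWhileJudge prev q.1 1 else na) false

theorem pvAval_append (prev : List (String × Int × Int × Int × Bool)) (t : String × Int × Int × Int × Bool) (m : Int) :
    pvAval (prev ++ [t]) m =
      (if t.2.1 = m ∧ t.1 = "b" then pvAval prev m || pvG prev ((prev.length : Int) - 1) else pvAval prev m) := by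
  unfold pvAval
  rw [PySem.List.enumerate_append]
  simp only [List.foldl_append]
  have hcon : ∀ (na : Bool), ∀ q ∈ PySem.List.enumerate prev 0,
      (if q.2.2.1 = m ∧ q.2.1 = "b" then na || pvWhileJudge (prev ++ [t]) q.1 1 else na) =
      (if q.2.2.1 = m ∧ q.2.1 = "b" then na || pvWhileJudge prev q.1 1 else na) := by
    intro na q hq
    rw [PySem.List.mem_enumerate_iff] at hq
    obtain ⟨k, hk, rfl⟩ := hq
    rw [pvWhileJudge_eq_g, pvWhileJudge_eq_g, pvG_append prev t _ (by push_cast; omega)]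
  rw [PySem.List.foldl_congr_mem _ _ _ _ hcon]
  simp [PySem.List.enumerate, pvWhileJudge_eq_g]
  rw [pvG_append _ _ _ (by omega)]

theorem pvTable_spec (prev : List (String × Int × Int × Int × Bool)) (m : Int) :
    (pvBuildTable prev).getD m false = pvAval prev m := by
  induction prev using List.reverseRecOn with
  | nil => rfl
  | append_singleton prev t ih =>
    rw [pvAval_append, pvG_track]
    unfold pvBuildTable
    rw [PySem.List.enumerate_append]
    simp only [List.foldl_append]
    have hsnd := pvBuild_snd (PySem.List.enumerate prev 0) (PySem.Dict.empty, none, -1)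
    simp only [PySem.List.enumerate, List.foldl_cons, List.foldl_nil]
    rw [show ((PySem.List.enumerate prev 0).foldl pvBuildStep (PySem.Dict.empty, none, -1)) =
        (pvBuildTable prev, pvTrack prev) from Prod.ext rfl hsnd]
    by_cases hb : t.1 = "b"
    · by_cases hc : (pvTrack prev).1 = some "f" ∧ (pvTrack prev).2 > 0
      · simp only [pvBuildStep, hb, hc, and_self, if_true]
        have hh := PySem.Dict.getD_insert (pvBuildTable prev) t.2.1 m true false
        by_cases hm : t.2.1 = m
        · simp [hm]
        · have hm' : ¬ m = t.2.1 := fun h => hm h.symm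
          simp [hm', hm, hh, ih]
      · simp only [pvBuildStep, hb]
        by_cases hm : t.2.1 = m <;> simp [hm, hc, ih]
    · simp only [pvBuildStep, hb]
      by_cases hm : t.2.1 = m <;> split_ifs <;> simp_all

theorem pv_main (ds : List (List (String × Int × Int × Int × Bool))) :
    add_new_attribute_NeedRecvForwardStart ds = add_new_attribute_NeedRecvForwardStart_alt ds := by
  unfold add_new_attribute_NeedRecvForwardStart add_new_attribute_NeedRecvForwardStart_alt
  apply PySem.List.foldl_congr_mem
  intro acc p hp
  rw [PySem.List.mem_enumerate_iff] at hp
  obtain ⟨k, hk, rfl⟩ := hp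
  simp only [List.append_cancel_left_eq, List.cons.injEq, and_true]
  apply PySem.List.foldl_congr_mem
  intro acc2 ct hct
  simp only [List.append_cancel_left_eq, List.cons.injEq, and_true, Prod.mk.injEq, true_and]
  by_cases hk0 : k = 0
  · subst hk0; simp
  · have hpos : ((0 : Int) + (k : Int)) > 0 := by omega
    by_cases hb : ct.1 = "b"
    · simp only [hb, hpos, and_self, if_true, decide_true, Bool.true_and]
      rw [show PySem.Dict.empty = pvBuildTable [] from rfl, PySem.List.pyGetD_map]
      rw [pvTable_spec]
      rfl
    · simp [hb]

-- ===== VERDICT (by name: the statement is the Claim_ definition above) =====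
theorem add_new_attribute_NeedRecvForwardStart_spec : Claim_equal_add_new_attribute_NeedRecvForwardStart := by
  intro ds _ _
  unfold Spec_add_new_attribute_NeedRecvForwardStart
  exact pv_main ds
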